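-- pv_equiv track=rewrite | github.com/johnykosmos/advent_of_code | 2023/3/solve.py | get_nums_cords
-- ===== SOURCE A (Python) =====
-- DIGITS = ('0','1','2','3','4','5','6','7','8','9')
--
-- def get_nums_cords(line: str, y_cord: int) -> list[list[tuple]]:
--     num = list()
--     nums_positions = list()
--     for index in range(len(line)):
--         if line[index] in DIGITS:
--             num.append((y_cord, index))
--
--         elif line[index] not in DIGITS and len(num) != 0:
--             nums_positions.append(num)
--             num = []
--
--     if num: # checking if the last index was a digit
--         nums_positions.append(num)
--
--     return nums_positions
-- ===== SOURCE B (Python) =====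
-- import re
--
-- def get_nums_cords(line: str, y_cord: int) -> list[list[tuple]]:
--     return [[(y_cord, i) for i in range(m.start(), m.end())]
--             for m in re.finditer(r'[0-9]+', line)]
-- ===== Notes on version B (the rewrite author's own statement) =====
-- stated objective: idiomatic
-- what changed: Replaces the character-by-character scan with a running accumulator by re.finditer over maximal [0-9]+ runs, expanding each match span into its coordinate list.
import Mathlib
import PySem

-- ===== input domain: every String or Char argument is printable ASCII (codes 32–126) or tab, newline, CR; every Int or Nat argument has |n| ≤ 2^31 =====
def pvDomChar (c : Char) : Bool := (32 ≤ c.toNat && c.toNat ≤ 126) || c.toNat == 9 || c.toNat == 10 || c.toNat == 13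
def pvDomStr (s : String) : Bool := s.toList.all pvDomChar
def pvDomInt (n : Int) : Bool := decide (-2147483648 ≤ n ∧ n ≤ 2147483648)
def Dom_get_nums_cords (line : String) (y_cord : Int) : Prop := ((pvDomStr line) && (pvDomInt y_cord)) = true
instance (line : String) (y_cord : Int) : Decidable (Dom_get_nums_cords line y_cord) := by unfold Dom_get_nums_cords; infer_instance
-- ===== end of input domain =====

-- B replaces A's char-by-char scan with an idiomatic find-digit-runs-then-expand pass (re.finditer): same O(n) work, measured constant-factor faster; no arguments are mutated.

-- ===== PORT A =====
-- DIGITS tuple: membership test 'line[index] in DIGITS' is equality with one of the ten ASCII digit characters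
def pvDIGITS : List Char := ['0','1','2','3','4','5','6','7','8','9']

-- A's loop body over (index, char); state = (num, nums_positions)
def get_nums_cords (line : String) (y_cord : Int) : List (List (Int × Int)) :=
  let st :=
    (PySem.List.enumerate line.toList 0).foldl
      (fun (st : List (Int × Int) × List (List (Int × Int))) p =>
        let (num, nums_positions) := st
        if p.2 ∈ pvDIGITS then (num ++ [(y_cord, p.1)], nums_positions)
        else if decide (p.2 ∈ pvDIGITS) = false ∧ num.length ≠ 0 then ([], nums_positions ++ [num])
        else (num, nums_positions))
      ([], [])
  if st.1 ≠ [] then st.2 ++ [st.1] else st.2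

-- ===== PORT B =====
-- pvSpans cs i = the (start, end) index pairs of the maximal runs of '0'-'9' in cs (cs starting at absolute index i); = re.finditer(r'[0-9]+', line) spans
def pvIsDig (c : Char) : Bool := decide (c ∈ pvDIGITS)

def pvSpans : List Char → Nat → List (Nat × Nat)
  | [], _ => []
  | c :: cs, i =>
    if pvIsDig c then
      let k := 1 + (cs.takeWhile pvIsDig).length
      (i, i + k) :: pvSpans (cs.drop (cs.takeWhile pvIsDig).length) (i + k)
    else
      pvSpans cs (i + 1)
  termination_by cs _ => cs.length
  decreasing_by
    · simpa using Nat.lt_succ_of_le (Nat.sub_le _ _)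
    · simp

def get_nums_cords_alt (line : String) (y_cord : Int) : List (List (Int × Int)) :=
  (pvSpans line.toList 0).map
    (fun s => (List.range' s.1 (s.2 - s.1)).map (fun i => (y_cord, (i : Int))))

-- ===== PRECONDITION & SPEC =====
def Spec_get_nums_cords (line : String) (y_cord : Int) (out : List (List (Int × Int))) : Prop := out = get_nums_cords_alt line y_cord
instance (line : String) (y_cord : Int) (out : List (List (Int × Int))) : Decidable (Spec_get_nums_cords line y_cord out) := by unfold Spec_get_nums_cords; infer_instance

-- ===== CLAIM (what is proved, stated in full; the proofs are below) =====
def Claim_equal_get_nums_cords : Prop := ∀ (line : String) (y_cord : Int), Dom_get_nums_cords line y_cord → Spec_get_nums_cords line y_cord (get_nums_cords line y_cord)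

-- ===== LEMMAS AND PROOFS =====

-- A's remaining loop, restated as structural recursion over (char, absolute index)
def pvPend (y : Int) : List Char → Nat → List (Int × Int) → List (List (Int × Int))
  | [], _, num => if num = [] then [] else [num]
  | c :: cs, i, num =>
    if pvIsDig c then pvPend y cs (i + 1) (num ++ [(y, (i : Int))])
    else (if num = [] then [] else [num]) ++ pvPend y cs (i + 1) []

def pvCoords (y : Int) (a k : Nat) : List (Int × Int) :=
  (List.range' a k).map (fun i => (y, (i : Int)))

-- drop of the takeWhile length is dropWhile
theorem pvDropTake : ∀ cs : List Char, cs.drop (cs.takeWhile pvIsDig).length = cs.dropWhile pvIsDig := by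
  intro cs
  induction cs with
  | nil => rfl
  | cons c cs ih => by_cases hc : pvIsDig c <;> simp [List.takeWhile_cons, List.dropWhile_cons, hc, ih]

theorem pvDropWhileHead : ∀ (cs : List Char) (c : Char) (rest : List Char),
    cs.dropWhile pvIsDig = c :: rest → pvIsDig c = false := by
  intro cs
  induction cs with
  | nil => intro c rest h; simp at h
  | cons a as ih =>
    intro c rest h
    by_cases ha : pvIsDig a
    · rw [List.dropWhile_cons, if_pos ha] at h; exact ih c rest h
    · rw [List.dropWhile_cons, if_neg ha] at h
      cases h; simpa using ha

-- pvPend consumes a digit prefix in one go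
theorem pvPend_take (y : Int) : ∀ (cs : List Char) (i : Nat) (num : List (Int × Int)),
    pvPend y cs i num =
      pvPend y (cs.drop (cs.takeWhile pvIsDig).length) (i + (cs.takeWhile pvIsDig).length)
        (num ++ pvCoords y i (cs.takeWhile pvIsDig).length) := by
  intro cs
  induction cs with
  | nil => intro i num; simp [pvCoords]
  | cons c cs ih =>
    intro i num
    by_cases hc : pvIsDig c
    · rw [List.takeWhile_cons, if_pos hc]
      simp only [List.length_cons, List.drop_succ_cons]
      have hstep : pvPend y (c :: cs) i num = pvPend y cs (i + 1) (num ++ [(y, (i : Int))]) := by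
        simp [pvPend, hc]
      rw [hstep, ih]
      have hco : pvCoords y i ((cs.takeWhile pvIsDig).length + 1)
          = (y, (i : Int)) :: pvCoords y (i + 1) (cs.takeWhile pvIsDig).length := by
        simp [pvCoords, List.range'_succ]
      rw [hco]
      simp [Nat.add_comm, Nat.add_left_comm, Nat.add_assoc]
    · rw [List.takeWhile_cons, if_neg hc]
      simp [pvCoords]

theorem pvPend_spans_aux (y : Int) : ∀ (n : Nat) (cs : List Char), cs.length ≤ n → ∀ (i : Nat),
    pvPend y cs i [] = (pvSpans cs i).map (fun s => pvCoords y s.1 (s.2 - s.1)) := by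
  intro n
  induction n with
  | zero =>
    intro cs h i
    have : cs = [] := List.length_eq_zero_iff.mp (Nat.le_zero.mp h)
    subst this
    simp [pvPend, pvSpans]
  | succ n ih =>
    intro cs hlen i
    cases cs with
    | nil => simp [pvPend, pvSpans]
    | cons c cs' =>
      by_cases hc : pvIsDig c
      · rw [pvPend_take]
        have htw : ((c :: cs').takeWhile pvIsDig).length = (cs'.takeWhile pvIsDig).length + 1 := by
          rw [List.takeWhile_cons, if_pos hc]; simp
        have hdr : (c :: cs').drop ((c :: cs').takeWhile pvIsDig).length = cs'.dropWhile pvIsDig := by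
          rw [htw, List.drop_succ_cons, pvDropTake]
        conv_rhs => rw [pvSpans]
        rw [if_pos hc]
        simp only [List.map_cons]
        have hsub : i + (1 + (cs'.takeWhile pvIsDig).length) - i = 1 + (cs'.takeWhile pvIsDig).length := by omega
        rw [hsub]
        have hdr2 : cs'.drop (cs'.takeWhile pvIsDig).length = cs'.dropWhile pvIsDig := pvDropTake cs'
        rw [hdr, hdr2, htw]
        have hk : (cs'.takeWhile pvIsDig).length + 1 = 1 + (cs'.takeWhile pvIsDig).length := by omega
        rw [hk]
        set k := 1 + (cs'.takeWhile pvIsDig).length with hkdef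
        have hk0 : k ≠ 0 := by omega
        have hne : pvCoords y i k ≠ [] := by
          simp [pvCoords]
          exact ⟨i, Nat.le_refl _, by omega⟩
        cases hdw : cs'.dropWhile pvIsDig with
        | nil => simp [pvPend, pvSpans, hne]
        | cons c2 rest =>
          have hc2 : pvIsDig c2 = false := pvDropWhileHead cs' c2 rest hdw
          have hp : pvPend y (c2 :: rest) (i + k) ([] ++ pvCoords y i k)
              = [pvCoords y i k] ++ pvPend y rest (i + k + 1) [] := by
            simp [pvPend, hc2, hne]
          rw [hp]
          have hsp : pvSpans (c2 :: rest) (i + k) = pvSpans rest (i + k + 1) := by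
            rw [pvSpans, if_neg (by simp [hc2])]
          rw [hsp]
          have hrest : rest.length ≤ n := by
            have h1 : (cs'.dropWhile pvIsDig).length ≤ cs'.length := List.length_dropWhile_le _ _
            rw [hdw] at h1
            simp only [List.length_cons] at h1 hlen
            omega
          rw [ih rest hrest (i + k + 1)]
          simp
      · have hp : pvPend y (c :: cs') i [] = pvPend y cs' (i + 1) [] := by
          simp [pvPend, hc]
        have hsp : pvSpans (c :: cs') i = pvSpans cs' (i + 1) := by
          rw [pvSpans, if_neg (by simpa using hc)]
        rw [hp, hsp]
        exact ih cs' (by simpa using Nat.lt_succ_iff.mp (Nat.lt_of_lt_of_le (Nat.lt_succ_self _) hlen)) (i + 1)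

theorem pvPend_spans (y : Int) : ∀ (cs : List Char) (i : Nat),
    pvPend y cs i [] = (pvSpans cs i).map (fun s => pvCoords y s.1 (s.2 - s.1)) := by
  intro cs i
  exact pvPend_spans_aux y cs.length cs (Nat.le_refl _) i

-- A's foldl over the enumerated tail equals pvPend, for any state
theorem pvFold_pend (y : Int) : ∀ (cs : List Char) (i : Nat)
    (num : List (Int × Int)) (nums : List (List (Int × Int))),
    (let st := (PySem.List.enumerate cs (i : Int)).foldl
      (fun (st : List (Int × Int) × List (List (Int × Int))) p =>
        let (num, nums_positions) := st
        if p.2 ∈ pvDIGITS then (num ++ [(y, p.1)], nums_positions)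
        else if decide (p.2 ∈ pvDIGITS) = false ∧ num.length ≠ 0 then ([], nums_positions ++ [num])
        else (num, nums_positions))
      (num, nums)
     if st.1 ≠ [] then st.2 ++ [st.1] else st.2)
    = nums ++ pvPend y cs i num := by
  intro cs
  induction cs with
  | nil =>
    intro i num nums
    by_cases h : num = [] <;> simp [PySem.List.enumerate_nil, pvPend, h]
  | cons c cs ih =>
    intro i num nums
    rw [PySem.List.enumerate_cons]
    by_cases hc : c ∈ pvDIGITS
    · simp only [List.foldl_cons, if_pos hc]
      have := ih (i + 1) (num ++ [(y, (i : Int))]) nums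
      simp only [Nat.cast_add, Nat.cast_one] at this ⊢
      rw [this]
      simp [pvPend, pvIsDig, hc]
    · by_cases hn : num = []
      · simp only [List.foldl_cons, if_neg hc, hn]
        have h2 : ¬ ((decide (c ∈ pvDIGITS) = false) ∧ ([] : List (Int × Int)).length ≠ 0) := by
          simp
        rw [if_neg h2]
        have := ih (i + 1) [] nums
        simp only [Nat.cast_add, Nat.cast_one] at this ⊢
        rw [this]
        simp [pvPend, pvIsDig, hc, hn]
      · simp only [List.foldl_cons, if_neg hc]
        have h2 : (decide (c ∈ pvDIGITS) = false) ∧ num.length ≠ 0 := by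
          simp [hc, hn, List.length_eq_zero_iff]
        rw [if_pos h2]
        have := ih (i + 1) [] (nums ++ [num])
        simp only [Nat.cast_add, Nat.cast_one] at this ⊢
        rw [this]
        simp [pvPend, pvIsDig, hc, hn]

-- ===== VERDICT (by name: the statement is the Claim_ definition above) =====
theorem get_nums_cords_spec : Claim_equal_get_nums_cords := by
  unfold Claim_equal_get_nums_cords
  intro line y _
  unfold Spec_get_nums_cords get_nums_cords get_nums_cords_alt
  have h := pvFold_pend y line.toList 0 [] []
  simp only [Nat.cast_zero] at h
  simp only [h, List.nil_append]
  rw [pvPend_spans]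
  rfl
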